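-- pv_equiv track=rewrite | github.com/dheerajsharma2399/telegram-automate | apply_agent.py | _match_relevant_experience
-- ===== SOURCE A (Python) =====
-- def _score_keywords(text: str, keywords: list) -> int:
--     """Count overlapping keywords between text and keyword list."""
--     if not text or not keywords:
--         return 0
--     text_lower = text.lower()
--     return sum(1 for kw in keywords if kw.lower() in text_lower)
--
-- def _match_relevant_experience(jd_text: str, profile: dict) -> list:
--     """Score and return top 2 work achievements matching the job description."""
--     experience = profile.get("work_experience", [])
--     scored = []
--     for exp in experience:
--         achievements = exp.get("key_achievements", [])
--         techs = exp.get("technologies", [])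
--         for ach in achievements:
--             score = _score_keywords(jd_text, [ach]) + _score_keywords(jd_text, techs)
--             scored.append((score, ach))
--     scored.sort(reverse=True)
--     return [a for _, a in scored[:2]]
-- ===== SOURCE B (Python) =====
-- def _match_relevant_experience(jd_text: str, profile: dict) -> list:
--     """Score and return top 2 work achievements matching the job description.
--
--     Single pass: per-experience tech score computed once, and the top two
--     (score, achievement) pairs maintained directly instead of sorting all."""
--     jd = jd_text.lower() if jd_text else None
--     best1 = None
--     best2 = None
--     for exp in profile.get("work_experience", []):
--         if jd is not None:
--             tech = sum(1 for t in exp.get("technologies", []) if t.lower() in jd)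
--         else:
--             tech = 0
--         for ach in exp.get("key_achievements", []):
--             if jd is not None:
--                 score = tech + (1 if ach.lower() in jd else 0)
--             else:
--                 score = tech
--             cand = (score, ach)
--             if best1 is None or cand > best1:
--                 best1, best2 = cand, best1
--             elif best2 is None or cand > best2:
--                 best2 = cand
--     out = []
--     if best1 is not None:
--         out.append(best1[1])
--     if best2 is not None:
--         out.append(best2[1])
--     return out
-- ===== Notes on version B (the rewrite author's own statement) =====
-- stated objective: alternative
-- what changed: Replaces build-all-then-sort-and-slice with a single streaming pass that computes each experience's technology score once and maintains only the current top-two (score, achievement) pairs, so no scored list is materialised and no sort is performed.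
import Mathlib
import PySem

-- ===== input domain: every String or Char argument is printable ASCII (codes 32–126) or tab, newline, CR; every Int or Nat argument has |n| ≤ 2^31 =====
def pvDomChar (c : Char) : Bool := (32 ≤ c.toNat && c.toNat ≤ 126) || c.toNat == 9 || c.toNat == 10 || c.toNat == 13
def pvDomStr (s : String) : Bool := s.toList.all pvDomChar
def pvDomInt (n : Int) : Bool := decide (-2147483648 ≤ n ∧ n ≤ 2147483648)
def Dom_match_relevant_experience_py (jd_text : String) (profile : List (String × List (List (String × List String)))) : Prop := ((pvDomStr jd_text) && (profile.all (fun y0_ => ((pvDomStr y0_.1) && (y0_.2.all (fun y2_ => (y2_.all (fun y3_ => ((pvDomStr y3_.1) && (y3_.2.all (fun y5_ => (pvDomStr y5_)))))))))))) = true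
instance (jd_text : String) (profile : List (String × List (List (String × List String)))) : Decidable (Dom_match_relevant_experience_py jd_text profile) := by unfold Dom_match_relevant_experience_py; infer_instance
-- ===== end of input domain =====

-- B replaces A's build-all / sort / slice with a streaming top-2 selection and a per-experience tech score computed once (alternative; same return value).


-- ===== PORT A =====
def pvScoreKeywords (text : String) (keywords : List String) : Int :=
  if text = "" || keywords = [] then 0
  else
    let text_lower := PySem.Str.lower text
    ((keywords.filter (fun kw => PySem.Str.isIn (PySem.Str.lower kw) text_lower)).length : Int)

def match_relevant_experience_py (jd_text : String) (profile : List (String × List (List (String × List String)))) : List String :=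
  let experience := (PySem.Dict.mk profile).getD "work_experience" []
  let scored := experience.foldl (fun scored exp =>
    let achievements := (PySem.Dict.mk exp).getD "key_achievements" []
    let techs := (PySem.Dict.mk exp).getD "technologies" []
    achievements.foldl (fun scored ach =>
      scored ++ [(pvScoreKeywords jd_text [ach] + pvScoreKeywords jd_text techs, ach)]) scored) []
  let sortedScored := PySem.List.sorted2 scored (fun x => x.1) (fun x => x.2) true
  (PySem.List.slice sortedScored none (some 2)).map Prod.snd

-- ===== PORT B =====
-- Python tuple comparison (a.1, a.2) < (b.1, b.2), lexicographic.
def pvLtP (a b : Int × String) : Bool :=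
  decide (a.1 < b.1) || (!decide (b.1 < a.1) && decide (a.2 < b.2))

-- one step of B's running top-2 maintenance ('cand > best' is pvLtP best cand)
def pvStepB (st : Option (Int × String) × Option (Int × String)) (cand : Int × String) :
    Option (Int × String) × Option (Int × String) :=
  match st with
  | (none, _) => (some cand, none)
  | (some a, b2) =>
    if pvLtP a cand then (some cand, some a)
    else
      match b2 with
      | none => (some a, some cand)
      | some b => if pvLtP b cand then (some a, some cand) else (some a, some b)

def match_relevant_experience_py_alt (jd_text : String) (profile : List (String × List (List (String × List String)))) : List String :=
  let jdOpt : Option String := if jd_text = "" then none else some (PySem.Str.lower jd_text)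
  let st := ((PySem.Dict.mk profile).getD "work_experience" []).foldl (fun st exp =>
    let tech : Int := match jdOpt with
      | none => 0
      | some jd => ((((PySem.Dict.mk exp).getD "technologies" []).filter
          (fun t => PySem.Str.isIn (PySem.Str.lower t) jd)).length : Int)
    ((PySem.Dict.mk exp).getD "key_achievements" []).foldl (fun st ach =>
      let score : Int := match jdOpt with
        | none => tech
        | some jd => tech + (if PySem.Str.isIn (PySem.Str.lower ach) jd then 1 else 0)
      pvStepB st (score, ach)) st) ((none, none))
  (match st.1 with | some a => [a.2] | none => []) ++
  (match st.2 with | some b => [b.2] | none => [])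

-- ===== PRECONDITION & SPEC =====
def Spec_match_relevant_experience_py (jd_text : String) (profile : List (String × List (List (String × List String)))) (out : List String) : Prop := out = match_relevant_experience_py_alt jd_text profile
instance (jd_text : String) (profile : List (String × List (List (String × List String)))) (out : List String) : Decidable (Spec_match_relevant_experience_py jd_text profile out) := by unfold Spec_match_relevant_experience_py; infer_instance

-- ===== CLAIM (what is proved, stated in full; the proofs are below) =====
def Claim_equal_match_relevant_experience_py : Prop := ∀ (jd_text : String) (profile : List (String × List (List (String × List String)))), Dom_match_relevant_experience_py jd_text profile → Spec_match_relevant_experience_py jd_text profile (match_relevant_experience_py jd_text profile)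

-- ===== LEMMAS AND PROOFS =====

-- first two elements of a list, in B's state shape
def pvTop2 : List (Int × String) → Option (Int × String) × Option (Int × String)
  | [] => (none, none)
  | [a] => (some a, none)
  | a :: b :: _ => (some a, some b)

theorem pvTop2_insertBy (x : Int × String) (acc : List (Int × String)) :
    pvTop2 (PySem.List.insertBy (fun a b => pvLtP b a) x acc) = pvStepB (pvTop2 acc) x := by
  match acc with
  | [] => rfl
  | [a] =>
    simp only [PySem.List.insertBy, pvTop2, pvStepB]
    by_cases h : pvLtP a x <;> simp [h]
  | a :: b :: r =>
    simp only [PySem.List.insertBy, pvTop2, pvStepB]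
    by_cases h1 : pvLtP a x <;> by_cases h2 : pvLtP b x <;> simp [h1, h2]

theorem pvTop2_foldl (l acc : List (Int × String)) :
    pvTop2 (l.foldl (fun acc x => PySem.List.insertBy (fun a b => pvLtP b a) x acc) acc)
      = l.foldl pvStepB (pvTop2 acc) := by
  induction l generalizing acc with
  | nil => rfl
  | cons x t ih => simp only [List.foldl_cons, ih, pvTop2_insertBy]

theorem pvFinalize_top2 (l : List (Int × String)) :
    ((match (pvTop2 l).1 with | some a => [a.2] | none => []) ++
     (match (pvTop2 l).2 with | some b => [b.2] | none => []))
      = (l.take 2).map Prod.snd := by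
  match l with
  | [] => rfl
  | [a] => rfl
  | a :: b :: r => rfl

-- pushing B's fold through the list-building fold (one appended pair per step)
theorem pvFoldl_build {α : Type} (g : α → Int × String) (achs : List α)
    (sc : List (Int × String)) (i : Option (Int × String) × Option (Int × String)) :
    achs.foldl (fun st a => pvStepB st (g a)) (sc.foldl pvStepB i)
      = (achs.foldl (fun sc a => sc ++ [g a]) sc).foldl pvStepB i := by
  induction achs generalizing sc with
  | nil => rfl
  | cons a t ih =>
    simp only [List.foldl_cons]
    have h : pvStepB (sc.foldl pvStepB i) (g a) = (sc ++ [g a]).foldl pvStepB i := by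
      simp [List.foldl_append]
    rw [h]
    exact ih (sc ++ [g a])

theorem pvMain (f : List (String × List String) → String → Int)
    (exps : List (List (String × List String))) (sc : List (Int × String)) :
    exps.foldl (fun st exp => ((PySem.Dict.mk exp).getD "key_achievements" []).foldl
        (fun st ach => pvStepB st (f exp ach, ach)) st) (sc.foldl pvStepB ((none, none)))
    = (exps.foldl (fun sc exp => ((PySem.Dict.mk exp).getD "key_achievements" []).foldl
        (fun sc ach => sc ++ [(f exp ach, ach)]) sc) sc).foldl pvStepB ((none, none)) := by
  induction exps generalizing sc with
  | nil => rfl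
  | cons e t ih =>
    simp only [List.foldl_cons]
    rw [pvFoldl_build (fun ach => (f e ach, ach))]
    exact ih _

theorem pvSorted2_eq (l : List (Int × String)) :
    PySem.List.sorted2 l (fun x => x.1) (fun x => x.2) true
      = l.foldl (fun acc x => PySem.List.insertBy (fun a b => pvLtP b a) x acc) [] := rfl

-- full pipeline, parametric in the per-(experience, achievement) score
theorem pvCore (f : List (String × List String) → String → Int)
    (exps : List (List (String × List String))) :
    (PySem.List.slice
      (PySem.List.sorted2
        (exps.foldl (fun sc exp => ((PySem.Dict.mk exp).getD "key_achievements" []).foldl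
            (fun sc ach => sc ++ [(f exp ach, ach)]) sc) [])
        (fun x => x.1) (fun x => x.2) true) none (some 2)).map Prod.snd
    = (match (exps.foldl (fun st exp => ((PySem.Dict.mk exp).getD "key_achievements" []).foldl
          (fun st ach => pvStepB st (f exp ach, ach)) st) ((none, none))).1 with
        | some a => [a.2] | none => []) ++
      (match (exps.foldl (fun st exp => ((PySem.Dict.mk exp).getD "key_achievements" []).foldl
          (fun st ach => pvStepB st (f exp ach, ach)) st) ((none, none))).2 with
        | some b => [b.2] | none => []) := by
  rw [PySem.List.slice_to _ (by norm_num : (0:Int) ≤ 2)]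
  rw [show Int.toNat 2 = 2 from rfl]
  rw [← pvFinalize_top2, pvSorted2_eq, pvTop2_foldl]
  rw [show pvTop2 [] = ((none, none) : Option (Int × String) × Option (Int × String)) from rfl]
  have h2 := pvMain f exps []
  simp only [List.foldl_nil] at h2
  rw [← h2]

theorem pvScore_eq (jd_text : String) (hj : ¬ jd_text = "") (techs : List String) (ach : String) :
    pvScoreKeywords jd_text [ach] + pvScoreKeywords jd_text techs
      = ((techs.filter (fun t => PySem.Str.isIn (PySem.Str.lower t) (PySem.Str.lower jd_text))).length : Int)
        + (if PySem.Str.isIn (PySem.Str.lower ach) (PySem.Str.lower jd_text) then 1 else 0) := by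
  by_cases ha : PySem.Chars.isIn (PySem.Chars.lower ach.toList) (PySem.Chars.lower jd_text.toList)
  all_goals by_cases ht : techs = []
  all_goals simp [pvScoreKeywords, hj, ht, ha]
  all_goals omega

theorem pvScoreKeywords_empty (ks : List String) : pvScoreKeywords "" ks = 0 := by
  simp [pvScoreKeywords]

-- ===== VERDICT (by name: the statement is the Claim_ definition above) =====
theorem match_relevant_experience_py_spec : Claim_equal_match_relevant_experience_py := by
  intro jd_text profile _
  unfold Spec_match_relevant_experience_py
  unfold match_relevant_experience_py match_relevant_experience_py_alt
  by_cases hj : jd_text = ""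
  · subst hj
    simp only [pvScoreKeywords_empty, zero_add, reduceIte]
    exact pvCore (fun _ _ => (0 : Int)) _
  · simp only [if_neg hj, pvScore_eq jd_text hj]
    exact pvCore (fun exp ach =>
      ((((PySem.Dict.mk exp).getD "technologies" []).filter
          (fun t => PySem.Str.isIn (PySem.Str.lower t) (PySem.Str.lower jd_text))).length : Int)
        + (if PySem.Str.isIn (PySem.Str.lower ach) (PySem.Str.lower jd_text) then 1 else 0)) _
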